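-- pv_equiv track=rewrite | github.com/msanchezzg/AdventOfCode | AdventOfCode2017/day11/day11.py | get_cell_index
-- ===== SOURCE A (Python) =====
-- from copy import copy
--
-- neighs_increments = (
--     ('n', (0, -2)),   ('s', (0, +2)),
--     ('nw', (-1, -1)), ('ne', (+1, -1)),
--     ('sw', (-1, +1)), ('se', (+1, +1)),
-- )
--
-- def manhattan_distance(cell1, cell2):
--     return abs(cell1[0] - cell2[0]) + abs(cell1[1] - cell2[1])
--
-- def get_cell_index(path, start_cell):
--     cell = list(start_cell)
--     furthest_cell = start_cell
--     furthest_distance = 0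
--     while path != []:
--         move = path.pop(0)
--         for coord, increment in neighs_increments:
--             if move == coord:
--                 cell[0] += increment[0]
--                 cell[1] += increment[1]
--
--             distance = manhattan_distance(start_cell, cell)
--             if distance > furthest_distance:
--                 furthest_cell = copy(cell)
--                 furthest_distance = distance
--
--     return tuple(cell), tuple(furthest_cell)
-- ===== SOURCE B (Python) =====
-- def get_cell_index(path, start_cell):
--     increments = {'n': (0, -2), 's': (0, 2), 'nw': (-1, -1),
--                   'ne': (1, -1), 'sw': (-1, 1), 'se': (1, 1)}
--     positions = [start_cell]
--     cell = start_cell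
--     for move in path:
--         dx, dy = increments.get(move, (0, 0))
--         cell = (cell[0] + dx, cell[1] + dy)
--         positions.append(cell)
--     furthest = max(positions,
--                    key=lambda p: abs(p[0] - start_cell[0]) + abs(p[1] - start_cell[1]))
--     return cell, furthest
-- ===== Notes on version B (the rewrite author's own statement) =====
-- stated objective: simpler
-- what changed: A's single while/pop loop with an inner scan over all six directions and an interleaved furthest-tracker is replaced by a two-phase decomposition: build the full trajectory once via a dict lookup, then read off the final cell and pick the furthest with max(positions, key=distance); return values are identical, but A empties the path list in place while B leaves it untouched.
import Mathlib
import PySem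

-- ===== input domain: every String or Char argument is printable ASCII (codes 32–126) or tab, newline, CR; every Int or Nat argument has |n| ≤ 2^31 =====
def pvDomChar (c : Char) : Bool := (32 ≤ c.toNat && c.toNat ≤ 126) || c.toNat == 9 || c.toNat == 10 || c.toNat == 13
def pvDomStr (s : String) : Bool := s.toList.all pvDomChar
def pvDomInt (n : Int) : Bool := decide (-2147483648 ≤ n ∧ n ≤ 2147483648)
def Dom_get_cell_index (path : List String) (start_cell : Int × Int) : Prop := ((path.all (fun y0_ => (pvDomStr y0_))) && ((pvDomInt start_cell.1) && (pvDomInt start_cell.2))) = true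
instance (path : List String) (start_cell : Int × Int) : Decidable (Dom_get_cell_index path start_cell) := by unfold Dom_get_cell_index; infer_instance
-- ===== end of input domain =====

-- B replaces A's interleaved while/pop loop (inner scan over all six directions with a running
-- furthest tracker) by a two-phase decomposition: build the full trajectory with a dict lookup,
-- then take the final cell and max(positions, key=distance). Return values are equal; side
-- effects differ: A empties `path` via pop(0), B leaves it intact (the equivalence proved here
-- is about the return value only).

-- ===== PORT A =====
def manhattan (c1 c2 : Int × Int) : Int := |c1.1 - c2.1| + |c1.2 - c2.2|

def neighsIncrements : List (String × (Int × Int)) :=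
  [("n", (0, -2)), ("s", (0, 2)), ("nw", (-1, -1)), ("ne", (1, -1)), ("sw", (-1, 1)), ("se", (1, 1))]

-- the body of `while path != []`: pop the head, run the inner `for` over neighs_increments
def gciLoop (start_cell : Int × Int) : List String → (Int × Int) → (Int × Int) → Int → (Int × Int) × (Int × Int)
  | [], cell, furthest_cell, _ => (cell, furthest_cell)
  | move :: rest, cell, furthest_cell, furthest_distance =>
      let st := neighsIncrements.foldl (fun (s : (Int × Int) × (Int × Int) × Int) ci =>
        let cell' := if move == ci.1 then (s.1.1 + ci.2.1, s.1.2 + ci.2.2) else s.1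
        let distance := manhattan start_cell cell'
        if distance > s.2.2 then (cell', cell', distance) else (cell', s.2.1, s.2.2))
        (cell, furthest_cell, furthest_distance)
      gciLoop start_cell rest st.1 st.2.1 st.2.2

def get_cell_index (path : List String) (start_cell : Int × Int) : (Int × Int) × (Int × Int) :=
  gciLoop start_cell path start_cell start_cell 0

-- ===== PORT B =====
def incrementsB : PySem.Dict String (Int × Int) :=
  PySem.Dict.ofList [("n", (0, -2)), ("s", (0, 2)), ("nw", (-1, -1)), ("ne", (1, -1)), ("sw", (-1, 1)), ("se", (1, 1))]

def get_cell_index_alt (path : List String) (start_cell : Int × Int) : (Int × Int) × (Int × Int) :=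
  let st := path.foldl (fun (s : List (Int × Int) × (Int × Int)) move =>
      let inc := PySem.Dict.getD incrementsB move (0, 0)
      let cell := (s.2.1 + inc.1, s.2.2 + inc.2)
      (s.1 ++ [cell], cell)) ([start_cell], start_cell)
  -- positions is seeded with start_cell, hence nonempty: Python's max never sees an empty
  -- list here, so maxD's default argument is never used
  let furthest := PySem.List.maxD st.1 (fun p => manhattan p start_cell) start_cell
  (st.2, furthest)

-- ===== PRECONDITION & SPEC =====
def Spec_get_cell_index (path : List String) (start_cell : Int × Int) (out : (Int × Int) × (Int × Int)) : Prop := out = get_cell_index_alt path start_cell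
instance (path : List String) (start_cell : Int × Int) (out : (Int × Int) × (Int × Int)) : Decidable (Spec_get_cell_index path start_cell out) := by unfold Spec_get_cell_index; infer_instance

-- ===== CLAIM (what is proved, stated in full; the proofs are below) =====
def Claim_equal_get_cell_index : Prop := ∀ (path : List String) (start_cell : Int × Int), Dom_get_cell_index path start_cell → Spec_get_cell_index path start_cell (get_cell_index path start_cell)

-- ===== LEMMAS AND PROOFS =====

-- one step of the trajectory (what B's loop body does to the current cell)
def stepB (move : String) (c : Int × Int) : Int × Int :=
  let inc := PySem.Dict.getD incrementsB move (0, 0)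
  (c.1 + inc.1, c.2 + inc.2)

-- the trajectory after the current cell, and the final cell
def trajP (c : Int × Int) : List String → List (Int × Int)
  | [] => []
  | m :: r => stepB m c :: trajP (stepB m c) r

def finalC (c : Int × Int) : List String → Int × Int
  | [] => c
  | m :: r => finalC (stepB m c) r

-- first-max pick, as Python's max(key=…) performs it
def pick (start_cell : Int × Int) (m x : Int × Int) : Int × Int :=
  if manhattan m start_cell < manhattan x start_cell then x else m

-- the body of A's inner `for`, and the inner fold itself
def gInner (move : String) (start_cell : Int × Int)
    (s : (Int × Int) × (Int × Int) × Int) (ci : String × (Int × Int)) :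
    (Int × Int) × (Int × Int) × Int :=
  let cell' := if move == ci.1 then (s.1.1 + ci.2.1, s.1.2 + ci.2.2) else s.1
  let distance := manhattan start_cell cell'
  if distance > s.2.2 then (cell', cell', distance) else (cell', s.2.1, s.2.2)

def innerFold (move : String) (start_cell : Int × Int)
    (s0 : (Int × Int) × (Int × Int) × Int) : (Int × Int) × (Int × Int) × Int :=
  neighsIncrements.foldl (gInner move start_cell) s0

theorem manhattan_comm (a b : Int × Int) : manhattan a b = manhattan b a := by
  simp [manhattan, abs_sub_comm]

-- a non-matching entry with a dominated cell changes nothing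
theorem g_miss {move k : String} {start_cell : Int × Int} {dx dy : Int} {cell f : Int × Int} {fd : Int}
    (hne : (move == k) = false) (h : manhattan start_cell cell ≤ fd) :
    gInner move start_cell (cell, f, fd) (k, (dx, dy)) = (cell, f, fd) := by
  simp only [gInner, hne, Bool.false_eq_true, if_false, gt_iff_lt]
  rw [if_neg (by omega)]

-- the matching entry applies the increment and runs the strict-improvement check
theorem g_hit {move k : String} {start_cell : Int × Int} {dx dy : Int} {cell f : Int × Int} {fd : Int}
    (heq : (move == k) = true) :
    gInner move start_cell (cell, f, fd) (k, (dx, dy))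
    = if fd < manhattan start_cell (cell.1 + dx, cell.2 + dy)
      then ((cell.1 + dx, cell.2 + dy), (cell.1 + dx, cell.2 + dy),
            manhattan start_cell (cell.1 + dx, cell.2 + dy))
      else ((cell.1 + dx, cell.2 + dy), f, fd) := by
  simp only [gInner, heq, if_true, gt_iff_lt]

theorem inner_fold_n (start_cell cell f : Int × Int) (fd : Int)
    (h : manhattan start_cell cell ≤ fd) :
    innerFold "n" start_cell (cell, f, fd)
    = (stepB "n" cell,
       if fd < manhattan start_cell (stepB "n" cell)
       then (stepB "n" cell, manhattan start_cell (stepB "n" cell)) else (f, fd)) := by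
  rw [show stepB "n" cell = (cell.1 + (0), cell.2 + (-2)) from rfl]
  show List.foldl (gInner "n" start_cell) (cell, f, fd) neighsIncrements = _
  simp only [neighsIncrements]
  rw [List.foldl_cons, g_hit rfl]
  by_cases hc : fd < manhattan start_cell (cell.1 + (0), cell.2 + (-2))
  · rw [if_pos hc]
    rw [List.foldl_cons, g_miss rfl le_rfl]
    rw [List.foldl_cons, g_miss rfl le_rfl]
    rw [List.foldl_cons, g_miss rfl le_rfl]
    rw [List.foldl_cons, g_miss rfl le_rfl]
    rw [List.foldl_cons, g_miss rfl le_rfl]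
    rw [List.foldl_nil, if_pos hc]
  · rw [if_neg hc]
    rw [List.foldl_cons, g_miss rfl (by omega)]
    rw [List.foldl_cons, g_miss rfl (by omega)]
    rw [List.foldl_cons, g_miss rfl (by omega)]
    rw [List.foldl_cons, g_miss rfl (by omega)]
    rw [List.foldl_cons, g_miss rfl (by omega)]
    rw [List.foldl_nil, if_neg hc]

theorem inner_fold_s (start_cell cell f : Int × Int) (fd : Int)
    (h : manhattan start_cell cell ≤ fd) :
    innerFold "s" start_cell (cell, f, fd)
    = (stepB "s" cell,
       if fd < manhattan start_cell (stepB "s" cell)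
       then (stepB "s" cell, manhattan start_cell (stepB "s" cell)) else (f, fd)) := by
  rw [show stepB "s" cell = (cell.1 + (0), cell.2 + (2)) from rfl]
  show List.foldl (gInner "s" start_cell) (cell, f, fd) neighsIncrements = _
  simp only [neighsIncrements]
  rw [List.foldl_cons, g_miss rfl h]
  rw [List.foldl_cons, g_hit rfl]
  by_cases hc : fd < manhattan start_cell (cell.1 + (0), cell.2 + (2))
  · rw [if_pos hc]
    rw [List.foldl_cons, g_miss rfl le_rfl]
    rw [List.foldl_cons, g_miss rfl le_rfl]
    rw [List.foldl_cons, g_miss rfl le_rfl]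
    rw [List.foldl_cons, g_miss rfl le_rfl]
    rw [List.foldl_nil, if_pos hc]
  · rw [if_neg hc]
    rw [List.foldl_cons, g_miss rfl (by omega)]
    rw [List.foldl_cons, g_miss rfl (by omega)]
    rw [List.foldl_cons, g_miss rfl (by omega)]
    rw [List.foldl_cons, g_miss rfl (by omega)]
    rw [List.foldl_nil, if_neg hc]

theorem inner_fold_nw (start_cell cell f : Int × Int) (fd : Int)
    (h : manhattan start_cell cell ≤ fd) :
    innerFold "nw" start_cell (cell, f, fd)
    = (stepB "nw" cell,
       if fd < manhattan start_cell (stepB "nw" cell)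
       then (stepB "nw" cell, manhattan start_cell (stepB "nw" cell)) else (f, fd)) := by
  rw [show stepB "nw" cell = (cell.1 + (-1), cell.2 + (-1)) from rfl]
  show List.foldl (gInner "nw" start_cell) (cell, f, fd) neighsIncrements = _
  simp only [neighsIncrements]
  rw [List.foldl_cons, g_miss rfl h]
  rw [List.foldl_cons, g_miss rfl h]
  rw [List.foldl_cons, g_hit rfl]
  by_cases hc : fd < manhattan start_cell (cell.1 + (-1), cell.2 + (-1))
  · rw [if_pos hc]
    rw [List.foldl_cons, g_miss rfl le_rfl]
    rw [List.foldl_cons, g_miss rfl le_rfl]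
    rw [List.foldl_cons, g_miss rfl le_rfl]
    rw [List.foldl_nil, if_pos hc]
  · rw [if_neg hc]
    rw [List.foldl_cons, g_miss rfl (by omega)]
    rw [List.foldl_cons, g_miss rfl (by omega)]
    rw [List.foldl_cons, g_miss rfl (by omega)]
    rw [List.foldl_nil, if_neg hc]

theorem inner_fold_ne (start_cell cell f : Int × Int) (fd : Int)
    (h : manhattan start_cell cell ≤ fd) :
    innerFold "ne" start_cell (cell, f, fd)
    = (stepB "ne" cell,
       if fd < manhattan start_cell (stepB "ne" cell)
       then (stepB "ne" cell, manhattan start_cell (stepB "ne" cell)) else (f, fd)) := by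
  rw [show stepB "ne" cell = (cell.1 + (1), cell.2 + (-1)) from rfl]
  show List.foldl (gInner "ne" start_cell) (cell, f, fd) neighsIncrements = _
  simp only [neighsIncrements]
  rw [List.foldl_cons, g_miss rfl h]
  rw [List.foldl_cons, g_miss rfl h]
  rw [List.foldl_cons, g_miss rfl h]
  rw [List.foldl_cons, g_hit rfl]
  by_cases hc : fd < manhattan start_cell (cell.1 + (1), cell.2 + (-1))
  · rw [if_pos hc]
    rw [List.foldl_cons, g_miss rfl le_rfl]
    rw [List.foldl_cons, g_miss rfl le_rfl]
    rw [List.foldl_nil, if_pos hc]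
  · rw [if_neg hc]
    rw [List.foldl_cons, g_miss rfl (by omega)]
    rw [List.foldl_cons, g_miss rfl (by omega)]
    rw [List.foldl_nil, if_neg hc]

theorem inner_fold_sw (start_cell cell f : Int × Int) (fd : Int)
    (h : manhattan start_cell cell ≤ fd) :
    innerFold "sw" start_cell (cell, f, fd)
    = (stepB "sw" cell,
       if fd < manhattan start_cell (stepB "sw" cell)
       then (stepB "sw" cell, manhattan start_cell (stepB "sw" cell)) else (f, fd)) := by
  rw [show stepB "sw" cell = (cell.1 + (-1), cell.2 + (1)) from rfl]
  show List.foldl (gInner "sw" start_cell) (cell, f, fd) neighsIncrements = _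
  simp only [neighsIncrements]
  rw [List.foldl_cons, g_miss rfl h]
  rw [List.foldl_cons, g_miss rfl h]
  rw [List.foldl_cons, g_miss rfl h]
  rw [List.foldl_cons, g_miss rfl h]
  rw [List.foldl_cons, g_hit rfl]
  by_cases hc : fd < manhattan start_cell (cell.1 + (-1), cell.2 + (1))
  · rw [if_pos hc]
    rw [List.foldl_cons, g_miss rfl le_rfl]
    rw [List.foldl_nil, if_pos hc]
  · rw [if_neg hc]
    rw [List.foldl_cons, g_miss rfl (by omega)]
    rw [List.foldl_nil, if_neg hc]

theorem inner_fold_se (start_cell cell f : Int × Int) (fd : Int)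
    (h : manhattan start_cell cell ≤ fd) :
    innerFold "se" start_cell (cell, f, fd)
    = (stepB "se" cell,
       if fd < manhattan start_cell (stepB "se" cell)
       then (stepB "se" cell, manhattan start_cell (stepB "se" cell)) else (f, fd)) := by
  rw [show stepB "se" cell = (cell.1 + (1), cell.2 + (1)) from rfl]
  show List.foldl (gInner "se" start_cell) (cell, f, fd) neighsIncrements = _
  simp only [neighsIncrements]
  rw [List.foldl_cons, g_miss rfl h]
  rw [List.foldl_cons, g_miss rfl h]
  rw [List.foldl_cons, g_miss rfl h]
  rw [List.foldl_cons, g_miss rfl h]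
  rw [List.foldl_cons, g_miss rfl h]
  rw [List.foldl_cons, g_hit rfl]
  by_cases hc : fd < manhattan start_cell (cell.1 + (1), cell.2 + (1))
  · rw [if_pos hc]
    rw [List.foldl_nil, if_pos hc]
  · rw [if_neg hc]
    rw [List.foldl_nil, if_neg hc]

-- an unrecognised move: the dict lookup misses and no entry of the inner `for` matches
theorem stepB_miss (move : String) (cell : Int × Int)
    (h1 : move ≠ "n") (h2 : move ≠ "s") (h3 : move ≠ "nw")
    (h4 : move ≠ "ne") (h5 : move ≠ "sw") (h6 : move ≠ "se") :
    stepB move cell = cell := by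
  have e1 : ("n" == move) = false := by simp [Ne.symm h1]
  have e2 : ("s" == move) = false := by simp [Ne.symm h2]
  have e3 : ("nw" == move) = false := by simp [Ne.symm h3]
  have e4 : ("ne" == move) = false := by simp [Ne.symm h4]
  have e5 : ("sw" == move) = false := by simp [Ne.symm h5]
  have e6 : ("se" == move) = false := by simp [Ne.symm h6]
  have hi : incrementsB.items
      = [("n", (0, -2)), ("s", (0, 2)), ("nw", (-1, -1)), ("ne", (1, -1)), ("sw", (-1, 1)), ("se", (1, 1))] := rfl
  simp [stepB, PySem.Dict.getD, PySem.Dict.get?, hi, List.find?, e1, e2, e3, e4, e5, e6]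

theorem inner_fold_missAll (start_cell cell f : Int × Int) (fd : Int) (move : String)
    (h : manhattan start_cell cell ≤ fd)
    (h1 : move ≠ "n") (h2 : move ≠ "s") (h3 : move ≠ "nw")
    (h4 : move ≠ "ne") (h5 : move ≠ "sw") (h6 : move ≠ "se") :
    innerFold move start_cell (cell, f, fd)
    = (stepB move cell,
       if fd < manhattan start_cell (stepB move cell)
       then (stepB move cell, manhattan start_cell (stepB move cell)) else (f, fd)) := by
  rw [stepB_miss move cell h1 h2 h3 h4 h5 h6]
  show List.foldl (gInner move start_cell) (cell, f, fd) neighsIncrements = _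
  simp only [neighsIncrements]
  rw [List.foldl_cons, g_miss (by simp [h1]) h]
  rw [List.foldl_cons, g_miss (by simp [h2]) h]
  rw [List.foldl_cons, g_miss (by simp [h3]) h]
  rw [List.foldl_cons, g_miss (by simp [h4]) h]
  rw [List.foldl_cons, g_miss (by simp [h5]) h]
  rw [List.foldl_cons, g_miss (by simp [h6]) h]
  rw [List.foldl_nil, if_neg (by omega)]

-- the inner `for`, entered with a dominated cell, for ANY move
theorem inner_fold_eq (start_cell cell f : Int × Int) (fd : Int) (move : String)
    (h : manhattan start_cell cell ≤ fd) :
    innerFold move start_cell (cell, f, fd)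
    = (stepB move cell,
       if fd < manhattan start_cell (stepB move cell)
       then (stepB move cell, manhattan start_cell (stepB move cell)) else (f, fd)) := by
  by_cases h1 : move = "n"
  · subst h1; exact inner_fold_n start_cell cell f fd h
  by_cases h2 : move = "s"
  · subst h2; exact inner_fold_s start_cell cell f fd h
  by_cases h3 : move = "nw"
  · subst h3; exact inner_fold_nw start_cell cell f fd h
  by_cases h4 : move = "ne"
  · subst h4; exact inner_fold_ne start_cell cell f fd h
  by_cases h5 : move = "sw"
  · subst h5; exact inner_fold_sw start_cell cell f fd h
  by_cases h6 : move = "se"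
  · subst h6; exact inner_fold_se start_cell cell f fd h
  exact inner_fold_missAll start_cell cell f fd move h h1 h2 h3 h4 h5 h6

-- A's loop with a dominated entering state computes the final cell and the first-max fold
theorem gciLoop_eq (start_cell : Int × Int) (path : List String) :
    ∀ (cell f : Int × Int) (fd : Int),
      manhattan start_cell cell ≤ fd → fd = manhattan start_cell f →
      gciLoop start_cell path cell f fd
        = (finalC cell path, (trajP cell path).foldl (pick start_cell) f) := by
  induction path with
  | nil => intro cell f fd h1 h2; simp [gciLoop, finalC, trajP]
  | cons m rest ih =>
      intro cell f fd h1 h2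
      show gciLoop start_cell rest (innerFold m start_cell (cell, f, fd)).1
          (innerFold m start_cell (cell, f, fd)).2.1 (innerFold m start_cell (cell, f, fd)).2.2 = _
      rw [inner_fold_eq start_cell cell f fd m h1]
      by_cases hc : fd < manhattan start_cell (stepB m cell)
      · rw [if_pos hc]
        simp only [finalC, trajP, List.foldl]
        have hp : pick start_cell f (stepB m cell) = stepB m cell := by
          simp only [pick, manhattan_comm]
          rw [if_pos (by omega)]
        rw [hp, ih (stepB m cell) (stepB m cell) (manhattan start_cell (stepB m cell)) le_rfl rfl]
      · rw [if_neg hc]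
        simp only [finalC, trajP, List.foldl]
        have hp : pick start_cell f (stepB m cell) = f := by
          simp only [pick, manhattan_comm]
          rw [if_neg (by omega)]
        rw [hp, ih (stepB m cell) f fd (by omega) h2]

-- B's fold builds the positions list and the final cell
theorem bfold_eq (path : List String) :
    ∀ (acc : List (Int × Int)) (cell : Int × Int),
      path.foldl (fun (s : List (Int × Int) × (Int × Int)) move =>
          let inc := PySem.Dict.getD incrementsB move (0, 0)
          let c := (s.2.1 + inc.1, s.2.2 + inc.2)
          (s.1 ++ [c], c)) (acc, cell)
        = (acc ++ trajP cell path, finalC cell path) := by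
  induction path with
  | nil => intro acc cell; simp [trajP, finalC]
  | cons m rest ih =>
      intro acc cell
      rw [List.foldl_cons]
      simp only [trajP, finalC]
      rw [show acc ++ stepB m cell :: trajP (stepB m cell) rest
            = (acc ++ [stepB m cell]) ++ trajP (stepB m cell) rest by simp]
      exact ih (acc ++ [stepB m cell]) (stepB m cell)

-- Python's max(m :: l, key=distance-to-start) is the running first-max fold from m
theorem maxD_cons (start_cell d : Int × Int) (l : List (Int × Int)) :
    ∀ m : Int × Int,
    PySem.List.maxD (m :: l) (fun p => manhattan p start_cell) d
      = l.foldl (pick start_cell) m := by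
  induction l with
  | nil => intro m; rfl
  | cons x t ih =>
      intro m
      rw [show PySem.List.maxD (m :: x :: t) (fun p => manhattan p start_cell) d
            = PySem.List.maxD (pick start_cell m x :: t) (fun p => manhattan p start_cell) d by
          by_cases h : manhattan m start_cell < manhattan x start_cell <;>
            simp [PySem.List.maxD, PySem.List.max?, pick, h]]
      rw [ih (pick start_cell m x), List.foldl_cons]

-- ===== VERDICT (by name: the statement is the Claim_ definition above) =====
theorem get_cell_index_spec : Claim_equal_get_cell_index := by
  intro path start_cell _
  have hA := gciLoop_eq start_cell path start_cell start_cell 0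
    (by simp [manhattan]) (by simp [manhattan])
  simp only [Spec_get_cell_index, get_cell_index, get_cell_index_alt, hA, bfold_eq,
    List.singleton_append, maxD_cons]
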